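-- pv_equiv track=rewrite | github.com/darinmoore/advent-of-code19 | day06/day06.py | get_orbits
-- ===== SOURCE A (Python) =====
-- def get_orbits(num_orbits_dict, planet, solar_system):
--     if planet not in num_orbits_dict:
--         if planet in solar_system:
--             num_orbits_dict[planet] = 1 + get_orbits(num_orbits_dict,
--                                                      solar_system[planet],
--                                                      solar_system)
--         else:
--             num_orbits_dict[planet] = 0
--     return num_orbits_dict[planet]
-- ===== SOURCE B (Python) =====
-- def get_orbits(num_orbits_dict, planet, solar_system):
--     # Iterative two-phase version: walk up the chain collecting the path,
--     # then assign depths back down.  Same return value and same memo updates.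
--     if planet in num_orbits_dict:
--         return num_orbits_dict[planet]
--     path = []
--     cur = planet
--     while cur not in num_orbits_dict and cur in solar_system:
--         path.append(cur)
--         cur = solar_system[cur]
--     base = num_orbits_dict.get(cur, 0)
--     if cur not in num_orbits_dict:
--         num_orbits_dict[cur] = 0
--     depth = base
--     for p in reversed(path):
--         depth += 1
--         num_orbits_dict[p] = depth
--     return num_orbits_dict[planet]
-- ===== Notes on version B (the rewrite author's own statement) =====
-- stated objective: alternative
-- what changed: Replaced the memoized recursion by an explicit iterative two-phase walk: collect the not-yet-memoized chain into a path list, then assign increasing depths back down; Pre_ excludes inputs where the parent chain cycles, on which A recurses forever (RecursionError).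
import Mathlib
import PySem

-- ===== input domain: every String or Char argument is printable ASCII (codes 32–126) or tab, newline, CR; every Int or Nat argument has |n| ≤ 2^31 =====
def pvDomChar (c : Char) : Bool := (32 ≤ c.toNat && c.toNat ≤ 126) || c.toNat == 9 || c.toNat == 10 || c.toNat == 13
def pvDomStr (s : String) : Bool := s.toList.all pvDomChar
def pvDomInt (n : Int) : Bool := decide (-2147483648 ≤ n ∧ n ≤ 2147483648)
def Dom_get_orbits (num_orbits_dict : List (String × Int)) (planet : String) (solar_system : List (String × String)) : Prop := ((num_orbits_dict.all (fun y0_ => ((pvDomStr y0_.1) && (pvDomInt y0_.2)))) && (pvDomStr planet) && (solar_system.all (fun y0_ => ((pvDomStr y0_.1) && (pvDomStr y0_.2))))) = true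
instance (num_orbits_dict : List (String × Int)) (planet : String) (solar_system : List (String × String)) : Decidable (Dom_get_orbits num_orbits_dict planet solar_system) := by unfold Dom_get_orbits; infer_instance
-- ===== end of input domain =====

-- B replaces the memoized recursion by an iterative two-phase walk (collect path, then
-- assign depths in reverse); equivalence is about the RETURN value (both Pythons also make
-- the same in-place memo updates). A recurses forever on a cyclic non-memoized chain; Pre_
-- excludes exactly those inputs.

-- dict lookup (first match) on an association list
def pvLookup {ν : Type} (d : List (String × ν)) (k : String) : Option ν :=
  (d.find? (fun p => p.1 == k)).map (·.2)

-- ===== PORT A =====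
-- A's recursion, fueled (fuel ss.length+1 is enough under Pre_; outside Pre_ A diverges).
-- Carries the mutated memo dict exactly as Python does; value part is the return value.
def goA (fuel : Nat) (nd : List (String × Int)) (planet : String)
    (ss : List (String × String)) : List (String × Int) × Int :=
  match fuel with
  | 0 => (nd, 0)
  | fuel + 1 =>
    match pvLookup nd planet with
    | some v => (nd, v)
    | none =>
      match pvLookup ss planet with
      | some parent =>
          let r := goA fuel nd parent ss
          (r.1 ++ [(planet, 1 + r.2)], 1 + r.2)
      | none => (nd ++ [(planet, 0)], 0)

def get_orbits (num_orbits_dict : List (String × Int)) (planet : String) (solar_system : List (String × String)) : Int :=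
  (goA (solar_system.length + 1) num_orbits_dict planet solar_system).2

-- ===== PORT B =====
-- B's while loop: collect the chain of planets that are neither memoized nor absent from
-- solar_system; returns (path, final planet). Fueled (same bound, reachable under Pre_).
def goB (fuel : Nat) (nd : List (String × Int)) (ss : List (String × String))
    (cur : String) : List String × String :=
  match fuel with
  | 0 => ([], cur)
  | fuel + 1 =>
    if (pvLookup nd cur).isSome then ([], cur)
    else
      match pvLookup ss cur with
      | none => ([], cur)
      | some nxt =>
        let r := goB fuel nd ss nxt
        (cur :: r.1, r.2)

def get_orbits_alt (num_orbits_dict : List (String × Int)) (planet : String) (solar_system : List (String × String)) : Int :=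
  match pvLookup num_orbits_dict planet with
  | some v => v
  | none =>
    let w := goB (solar_system.length + 1) num_orbits_dict solar_system planet
    let base := (pvLookup num_orbits_dict w.2).getD 0
    -- the for-loop over reversed(path) assigns base+1, …, base+len(path); the final
    -- num_orbits_dict[planet] is the last value assigned, i.e. base + len(path)
    base + w.1.length

-- ===== PRECONDITION & SPEC =====
def pvStops (nd : List (String × Int)) (ss : List (String × String)) (p : String) : Bool :=
  (pvLookup nd p).isSome || (pvLookup ss p).isNone

def pvFollow (ss : List (String × String)) (p : String) : String :=
  (pvLookup ss p).getD p

-- Pre_ excludes inputs whose parent chain from `planet` never reaches a memoized or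
-- parentless planet (a cycle): there Python A recurses forever (RecursionError).
def Pre_get_orbits (num_orbits_dict : List (String × Int)) (planet : String) (solar_system : List (String × String)) : Prop :=
  ∃ k ∈ List.range (solar_system.length + 1),
    pvStops num_orbits_dict solar_system ((pvFollow solar_system)^[k] planet) = true
instance (num_orbits_dict : List (String × Int)) (planet : String) (solar_system : List (String × String)) : Decidable (Pre_get_orbits num_orbits_dict planet solar_system) := by unfold Pre_get_orbits; infer_instance

def pvWitness_get_orbits : (List (String × Int)) × String × (List (String × String)) :=
  ([("COM", 0)], "C", [("B", "COM"), ("C", "B")])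

def Spec_get_orbits (num_orbits_dict : List (String × Int)) (planet : String) (solar_system : List (String × String)) (out : Int) : Prop := out = get_orbits_alt num_orbits_dict planet solar_system
instance (num_orbits_dict : List (String × Int)) (planet : String) (solar_system : List (String × String)) (out : Int) : Decidable (Spec_get_orbits num_orbits_dict planet solar_system out) := by unfold Spec_get_orbits; infer_instance

-- ===== CLAIM (what is proved, stated in full; the proofs are below) =====
def Claim_equal_get_orbits : Prop := ∀ (num_orbits_dict : List (String × Int)) (planet : String) (solar_system : List (String × String)), Dom_get_orbits num_orbits_dict planet solar_system → Pre_get_orbits num_orbits_dict planet solar_system → Spec_get_orbits num_orbits_dict planet solar_system (get_orbits num_orbits_dict planet solar_system)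

-- ===== LEMMAS AND PROOFS =====

-- B's value expression, as a function of fuel (what get_orbits_alt computes at a given fuel)
def bVal (fuel : Nat) (nd : List (String × Int)) (ss : List (String × String)) (p : String) : Int :=
  match pvLookup nd p with
  | some v => v
  | none =>
    let w := goB fuel nd ss p
    (pvLookup nd w.2).getD 0 + w.1.length

lemma bVal_memo {fuel : Nat} {nd : List (String × Int)} {ss : List (String × String)}
    {p : String} {v : Int} (h : pvLookup nd p = some v) : bVal fuel nd ss p = v := by
  simp [bVal, h]

-- step lemmas unfolding one layer of goA / goB
lemma goA_memo {f : Nat} {nd : List (String × Int)} {ss : List (String × String)}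
    {p : String} {v : Int} (h : pvLookup nd p = some v) : (goA (f + 1) nd p ss).2 = v := by
  simp [goA, h]

lemma goA_step {f : Nat} {nd : List (String × Int)} {ss : List (String × String)}
    {p q : String} (h1 : pvLookup nd p = none) (h2 : pvLookup ss p = some q) :
    (goA (f + 1) nd p ss).2 = 1 + (goA f nd q ss).2 := by
  simp [goA, h1, h2]

lemma goB_step {f : Nat} {nd : List (String × Int)} {ss : List (String × String)}
    {p q : String} (h1 : pvLookup nd p = none) (h2 : pvLookup ss p = some q) :
    goB (f + 1) nd ss p = ((p :: (goB f nd ss q).1, (goB f nd ss q).2) : List String × String) := by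
  simp [goB, h1, h2]

lemma goB_stop {f : Nat} {nd : List (String × Int)} {ss : List (String × String)}
    {p : String} {v : Int} (h : pvLookup nd p = some v) :
    goB (f + 1) nd ss p = (([], p) : List String × String) := by
  simp [goB, h]

-- core lemma: if the chain from p stops within k steps and k < fuel, A's value = B's value
lemma goA_eq_bVal (nd : List (String × Int)) (ss : List (String × String)) :
    ∀ (k : Nat) (p : String) (fuel : Nat), k < fuel →
      pvStops nd ss ((pvFollow ss)^[k] p) = true →
      (goA fuel nd p ss).2 = bVal fuel nd ss p := by
  intro k
  induction k with
  | zero =>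
    intro p fuel hf hs
    obtain ⟨f, rfl⟩ : ∃ f, fuel = f + 1 := ⟨fuel - 1, by omega⟩
    simp only [Function.iterate_zero, id_eq, pvStops, Bool.or_eq_true,
      Option.isSome_iff_exists, Option.isNone_iff_eq_none] at hs
    rcases hs with ⟨v, hv⟩ | hnone
    · rw [goA_memo hv, bVal_memo hv]
    · cases hmem : pvLookup nd p with
      | some v => rw [goA_memo hmem, bVal_memo hmem]
      | none => simp [goA, bVal, goB, hmem, hnone]
  | succ k ih =>
    intro p fuel hf hs
    obtain ⟨f, rfl⟩ : ∃ f, fuel = f + 1 := ⟨fuel - 1, by omega⟩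
    cases hmem : pvLookup nd p with
    | some v => rw [goA_memo hmem, bVal_memo hmem]
    | none =>
      cases hpar : pvLookup ss p with
      | none => simp [goA, bVal, goB, hmem, hpar]
      | some q =>
        have hstep : pvFollow ss p = q := by simp [pvFollow, hpar]
        have hs' : pvStops nd ss ((pvFollow ss)^[k] q) = true := by
          rwa [Function.iterate_succ_apply, hstep] at hs
        have hk : k < f := by omega
        have hrec := ih q f hk hs'
        rw [goA_step hmem hpar, hrec]
        show _ = bVal (f + 1) nd ss p
        unfold bVal
        rw [hmem, goB_step hmem hpar]
        cases hq : pvLookup nd q with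
        | some v =>
          obtain ⟨f', rfl⟩ : ∃ f', f = f' + 1 := ⟨f - 1, by omega⟩
          rw [goB_stop hq]
          simp [hq]
          omega
        | none =>
          simp only [List.length_cons]
          push_cast
          ring

-- ===== VERDICT (by name: the statement is the Claim_ definition above) =====
theorem get_orbits_spec : Claim_equal_get_orbits := by
  intro nd planet ss _ hpre
  unfold Spec_get_orbits
  obtain ⟨k, hk, hs⟩ := hpre
  rw [List.mem_range] at hk
  have h := goA_eq_bVal nd ss k planet (ss.length + 1) hk hs
  unfold get_orbits
  rw [h]
  unfold get_orbits_alt bVal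
  cases pvLookup nd planet <;> simp
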